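-- pv_equiv track=rewrite | github.com/BangRocket/mypalclara | mypalclara/core/security/worm_persona.py | build_capability_inventory
-- ===== SOURCE A (Python) =====
-- from typing import Any
--
-- def build_capability_inventory(tools: list[dict[str, Any]]) -> str:
--     """Generate a dynamic capability inventory from the actual tool list.
--
--     Groups tools by category prefix (github_*, s3_*, etc.) and lists
--     each group with one-line descriptions. This stays current as tools
--     are added or removed.
--
--     Args:
--         tools: List of tool schema dicts (each with "name" and optionally "description")
--
--     Returns:
--         Formatted capability inventory string
--     """
--     groups: dict[str, list[str]] = {}
--
--     for tool in tools:
--         name = tool.get("name", "")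
--         desc = tool.get("description", "")
--         # Truncate long descriptions to first sentence
--         if desc and ". " in desc:
--             desc = desc[: desc.index(". ") + 1]
--         if len(desc) > 120:
--             desc = desc[:117] + "..."
--
--         # Group by prefix (everything before first underscore)
--         if "_" in name:
--             prefix = name[: name.index("_")]
--         else:
--             prefix = "general"
--
--         entry = f"  - {name}: {desc}" if desc else f"  - {name}"
--         groups.setdefault(prefix, []).append(entry)
--
--     lines = []
--     for prefix in sorted(groups):
--         lines.append(f"**{prefix}** ({len(groups[prefix])} tools)")
--         lines.extend(groups[prefix])
--         lines.append("")
--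
--     return "\n".join(lines)
-- ===== SOURCE B (Python) =====
-- def build_capability_inventory(tools: list) -> str:
--     """Same inventory via map + stable sort + run-grouping recursion:
--     no dict of groups is ever built."""
--
--     def _format(tool):
--         name = tool.get("name", "")
--         desc = tool.get("description", "")
--         cut = desc.find(". ")
--         if cut != -1:
--             desc = desc[: cut + 1]
--         if len(desc) > 120:
--             desc = desc[:117] + "..."
--         u = name.find("_")
--         prefix = "general" if u == -1 else name[:u]
--         return prefix, ("  - " + name if desc == "" else "  - " + name + ": " + desc)
--
--     def _emit(pairs):
--         if not pairs:
--             return []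
--         k, e = pairs[0]
--         rest = pairs[1:]
--         i = 0
--         while i < len(rest) and rest[i][0] == k:
--             i += 1
--         grp = [e] + [x for _, x in rest[:i]]
--         return (["**%s** (%d tools)" % (k, len(grp))] + grp + [""]
--                 + _emit(rest[i:]))
--
--     return "\n".join(_emit(sorted(map(_format, tools), key=lambda p: p[0])))
-- ===== Notes on version B (the rewrite author's own statement) =====
-- stated objective: alternative
-- what changed: Replaces A's incrementally built dict of groups (setdefault/append, then a loop over sorted keys with dict lookups) by a map of each tool to a (prefix, entry) pair, one stable sort of those pairs by prefix, and a recursive run-grouping walk that emits each adjacent group directly; no dict is kept.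
import Mathlib
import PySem

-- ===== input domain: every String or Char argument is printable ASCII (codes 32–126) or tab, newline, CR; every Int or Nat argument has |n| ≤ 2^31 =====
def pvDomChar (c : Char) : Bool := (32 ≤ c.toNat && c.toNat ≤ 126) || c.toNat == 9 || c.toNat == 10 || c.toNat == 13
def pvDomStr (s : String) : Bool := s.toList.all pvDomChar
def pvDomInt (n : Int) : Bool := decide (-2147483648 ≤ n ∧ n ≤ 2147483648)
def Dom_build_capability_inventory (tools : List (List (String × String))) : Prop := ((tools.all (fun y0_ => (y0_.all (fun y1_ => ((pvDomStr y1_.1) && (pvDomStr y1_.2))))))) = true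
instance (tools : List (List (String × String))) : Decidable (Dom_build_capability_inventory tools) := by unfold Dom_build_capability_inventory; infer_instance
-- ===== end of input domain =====

-- B replaces A's incrementally built dict of groups by: map each tool to a
-- (prefix, entry) pair, stable-sort the pairs by prefix, and emit each adjacent
-- run by a recursive walk — no dict is kept (objective: alternative).

-- ===== PORT A =====
-- A's tool.get(k, "") — first-match lookup in the assoc list
def pvGetStr (tool : List (String × String)) (k : String) : String :=
  match tool.find? (fun p => p.1 == k) with
  | some p => p.2
  | none => ""

def build_capability_inventory (tools : List (List (String × String))) : String :=
  -- groups: dict[str, list[str]]; setdefault(prefix, []).append(entry) is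
  -- exactly d[prefix] = d.get(prefix, []) + [entry], i.e. Dict.modify
  let groups : PySem.Dict String (List String) :=
    tools.foldl (fun g tool =>
      let name := pvGetStr tool "name"
      let desc := pvGetStr tool "description"
      let desc := if desc != "" && PySem.Str.isIn ". " desc then
          PySem.Str.slice desc none (some (PySem.Str.find desc ". " + 1)) else desc
      let desc := if PySem.Str.len desc > 120 then
          PySem.Str.join "" [PySem.Str.slice desc none (some 117), "..."] else desc
      let prefix_ := if PySem.Str.isIn "_" name then
          PySem.Str.slice name none (some (PySem.Str.find name "_")) else "general"
      let entry := if desc != "" then PySem.Str.join "" ["  - ", name, ": ", desc]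
                   else PySem.Str.join "" ["  - ", name]
      g.modify prefix_ [] (fun l => l ++ [entry])) PySem.Dict.empty
  let lines : List String :=
    (PySem.List.sorted groups.keys (fun k => k) false).foldl (fun lines prefix_ =>
      lines ++ [PySem.Str.join "" ["**", prefix_, "** (",
                  PySem.Int.toStr ((groups.getD prefix_ []).length : Int), " tools)"]]
            ++ groups.getD prefix_ [] ++ [""]) []
  PySem.Str.join "\n" lines

-- ===== PORT B =====
-- Source B's _format: one tool → its (prefix, formatted entry) pair
def pvFormat (tool : List (String × String)) : String × String :=
  let name := (tool.find? (fun q => q.1 == "name")).elim "" Prod.snd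
  let d0 := (tool.find? (fun q => q.1 == "description")).elim "" Prod.snd
  let cut := PySem.Str.find d0 ". "
  let d1 := if cut == -1 then d0 else PySem.Str.slice d0 none (some (cut + 1))
  let desc := if PySem.Str.len d1 > 120 then
      PySem.Str.join "" [PySem.Str.slice d1 none (some 117), "..."] else d1
  let u := PySem.Str.find name "_"
  let prefix_ := if u == -1 then "general" else PySem.Str.slice name none (some u)
  (prefix_, if desc == "" then PySem.Str.join "" ["  - ", name]
            else PySem.Str.join "" ["  - ", name, ": ", desc])

-- Source B's _emit: the leading run rest[:i] / rest[i:] of the while loop is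
-- exactly takeWhile / dropWhile on the equal-prefix predicate
def pvEmit : List (String × String) → List String
  | [] => []
  | p :: rest =>
    let run := rest.takeWhile (fun q => q.1 == p.1)
    let grp := p.2 :: run.map Prod.snd
    (PySem.Str.join "" ["**", p.1, "** (", PySem.Int.toStr (grp.length : Int), " tools)"]
      :: grp) ++ [""] ++ pvEmit (rest.dropWhile (fun q => q.1 == p.1))
termination_by l => l.length
decreasing_by
  simp only [List.length_cons]
  exact Nat.lt_succ_of_le (List.length_dropWhile_le _ _)

def build_capability_inventory_alt (tools : List (List (String × String))) : String :=
  PySem.Str.join "\n"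
    (pvEmit (PySem.List.sorted (tools.map pvFormat) (fun p => p.1) false))

-- ===== PRECONDITION & SPEC =====
def Spec_build_capability_inventory (tools : List (List (String × String))) (out : String) : Prop := out = build_capability_inventory_alt tools
instance (tools : List (List (String × String))) (out : String) : Decidable (Spec_build_capability_inventory tools out) := by unfold Spec_build_capability_inventory; infer_instance

-- ===== CLAIM (what is proved, stated in full; the proofs are below) =====
def Claim_equal_build_capability_inventory : Prop := ∀ (tools : List (List (String × String))), Dom_build_capability_inventory tools → Spec_build_capability_inventory tools (build_capability_inventory tools)

-- ===== LEMMAS AND PROOFS =====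

-- A's per-tool pair, written out (proof-side mirror of A's loop body)
def pvPairA (tool : List (String × String)) : String × String :=
  let name := pvGetStr tool "name"
  let desc := pvGetStr tool "description"
  let desc := if desc != "" && PySem.Str.isIn ". " desc then
      PySem.Str.slice desc none (some (PySem.Str.find desc ". " + 1)) else desc
  let desc := if PySem.Str.len desc > 120 then
      PySem.Str.join "" [PySem.Str.slice desc none (some 117), "..."] else desc
  let prefix_ := if PySem.Str.isIn "_" name then
      PySem.Str.slice name none (some (PySem.Str.find name "_")) else "general"
  let entry := if desc != "" then PySem.Str.join "" ["  - ", name, ": ", desc]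
               else PySem.Str.join "" ["  - ", name]
  (prefix_, entry)

theorem pvGetStr_eq (tool : List (String × String)) (k : String) :
    pvGetStr tool k = (tool.find? (fun q => q.1 == k)).elim "" Prod.snd := by
  unfold pvGetStr
  cases tool.find? (fun q => q.1 == k) <;> rfl

theorem pv_trunc_eq (d : String) :
    (if d != "" && PySem.Str.isIn ". " d then
        PySem.Str.slice d none (some (PySem.Str.find d ". " + 1)) else d)
    = (if PySem.Str.find d ". " == -1 then d
       else PySem.Str.slice d none (some (PySem.Str.find d ". " + 1))) := by
  by_cases h : d = ""
  · subst h; decide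
  · by_cases hf : PySem.Str.find d ". " = -1 <;>
      simp [PySem.Str.isIn, PySem.Chars.isIn, PySem.Str.find, bne, h]

theorem pv_prefix_eq (n : String) :
    (if PySem.Str.isIn "_" n then
        PySem.Str.slice n none (some (PySem.Str.find n "_")) else "general")
    = (if PySem.Str.find n "_" == -1 then "general"
       else PySem.Str.slice n none (some (PySem.Str.find n "_"))) := by
  by_cases hf : PySem.Str.find n "_" = -1 <;>
    simp [PySem.Str.isIn, PySem.Chars.isIn, PySem.Str.find, bne]

theorem pv_entry_eq (name d : String) :
    (if d != "" then PySem.Str.join "" ["  - ", name, ": ", d]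
     else PySem.Str.join "" ["  - ", name])
    = (if d == "" then PySem.Str.join "" ["  - ", name]
       else PySem.Str.join "" ["  - ", name, ": ", d]) := by
  by_cases h : d = "" <;> simp [bne, h]

theorem pvPairA_eq (tool : List (String × String)) : pvPairA tool = pvFormat tool := by
  simp only [pvPairA, pvFormat, pvGetStr_eq, pv_trunc_eq, pv_prefix_eq, pv_entry_eq]

-- the group of key k, read off the pair list
def pvGrp (ps : List (String × String)) (k : String) : List String :=
  (ps.filter (fun q => q.1 == k)).map Prod.snd

-- one output section for key k
def pvSec (ps : List (String × String)) (k : String) : List String :=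
  PySem.Str.join "" ["**", k, "** (", PySem.Int.toStr ((pvGrp ps k).length : Int), " tools)"]
    :: pvGrp ps k ++ [""]

-- ---- stability of the sort: filtering one key commutes with sorting ----
theorem pv_filter_insertBy (x : String × String) (ys : List (String × String)) (k : String)
    (h : ys.Pairwise (fun a b => a.1 ≤ b.1)) :
    (PySem.List.insertBy (fun a b => decide (a.1 < b.1)) x ys).filter (fun q => q.1 == k)
    = ys.filter (fun q => q.1 == k) ++ (if x.1 == k then [x] else []) := by
  induction ys with
  | nil => simp [PySem.List.insertBy, List.filter_cons]
  | cons y ys ih =>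
    rw [List.pairwise_cons] at h
    by_cases hc : x.1 < y.1
    · have hx : PySem.List.insertBy (fun a b => decide (a.1 < b.1)) x (y :: ys)
          = x :: y :: ys := by simp [PySem.List.insertBy, hc]
      rw [hx]
      by_cases hk : x.1 = k
      · have hky : k < y.1 := by rw [← hk]; exact hc
        have hnil : (y :: ys).filter (fun q => q.1 == k) = [] := by
          rw [List.filter_eq_nil_iff]
          intro a ha
          have hka : k < a.1 := by
            rcases List.mem_cons.mp ha with rfl | ha'
            · exact hky
            · exact lt_of_lt_of_le hky (h.1 a ha')
          simp only [beq_iff_eq]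
          exact ne_of_gt hka
        rw [List.filter_cons_of_pos (by simp [hk]), hnil]
        simp [hk]
      · rw [List.filter_cons_of_neg (by simp [hk])]
        simp [hk]
    · have hx : PySem.List.insertBy (fun a b => decide (a.1 < b.1)) x (y :: ys)
          = y :: PySem.List.insertBy (fun a b => decide (a.1 < b.1)) x ys := by
        simp [PySem.List.insertBy, hc]
      rw [hx, List.filter_cons, List.filter_cons, ih h.2]
      by_cases hy : y.1 = k <;> simp [hy]

theorem pv_filter_foldl_insertBy (l : List (String × String)) (acc : List (String × String))
    (k : String) (h : acc.Pairwise (fun a b => a.1 ≤ b.1)) :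
    (l.foldl (fun a x => PySem.List.insertBy (fun a b => decide (a.1 < b.1)) x a) acc).filter
        (fun q => q.1 == k)
    = acc.filter (fun q => q.1 == k) ++ l.filter (fun q => q.1 == k) := by
  induction l generalizing acc with
  | nil => simp
  | cons x l ih =>
    have hp : (PySem.List.insertBy (fun a b => decide (a.1 < b.1)) x acc).Pairwise
        (fun a b => a.1 ≤ b.1) :=
      PySem.List.insertBy_pairwise_le (fun q => q.1) x acc h
    rw [List.foldl_cons, ih _ hp, pv_filter_insertBy x acc k h, List.filter_cons]
    by_cases hx : x.1 = k <;> simp [hx]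

theorem pv_filter_sorted (ps : List (String × String)) (k : String) :
    (PySem.List.sorted ps (fun q => q.1) false).filter (fun q => q.1 == k)
    = ps.filter (fun q => q.1 == k) := by
  rw [PySem.List.sorted_eq_foldl_insertBy ps (fun q => q.1)]
  simpa using pv_filter_foldl_insertBy ps [] k List.Pairwise.nil

-- ---- Set.ofList helpers ----
theorem pv_foldl_add_of_mem (l : List String) (s : PySem.Set String)
    (h : ∀ x ∈ l, x ∈ s) : l.foldl PySem.Set.add s = s := by
  induction l with
  | nil => rfl
  | cons x l ih =>
    have hx : PySem.Set.add s x = s := by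
      simp [PySem.Set.add, PySem.Set.contains, h x (by simp)]
    rw [List.foldl_cons, hx]
    exact ih (fun y hy => h y (by simp [hy]))

theorem pv_foldl_add_cons (l : List String) (s : PySem.Set String) (k : String)
    (h : k ∉ l) : l.foldl PySem.Set.add (k :: s) = k :: l.foldl PySem.Set.add s := by
  induction l generalizing s with
  | nil => rfl
  | cons x l ih =>
    have hxk : x ≠ k := fun he => h (by simp [he])
    have hadd : PySem.Set.add (k :: s) x = k :: PySem.Set.add s x := by
      by_cases hm : x ∈ s <;> simp [PySem.Set.add, PySem.Set.contains, hm, hxk]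
    rw [List.foldl_cons, hadd, ih _ (fun hm => h (by simp [hm])), List.foldl_cons]

-- ---- everything after the head's run has a strictly larger key ----
theorem pv_drop_gt (k : String) (l : List (String × String))
    (hP : l.Pairwise (fun a b => a.1 ≤ b.1)) (hall : ∀ q ∈ l, k ≤ q.1) :
    ∀ q ∈ l.dropWhile (fun q => q.1 == k), k < q.1 := by
  induction l with
  | nil => simp
  | cons y t ih =>
    rw [List.pairwise_cons] at hP
    by_cases hy : y.1 = k
    · rw [List.dropWhile_cons_of_pos (by simp [hy])]
      exact ih hP.2 (fun q hq => hall q (by simp [hq]))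
    · rw [List.dropWhile_cons_of_neg (by simp [hy])]
      intro q hq
      rcases List.mem_cons.mp hq with rfl | hq'
      · exact lt_of_le_of_ne (hall q (by simp)) (fun he => hy he.symm)
      · exact lt_of_lt_of_le (lt_of_le_of_ne (hall y (by simp)) (fun he => hy he.symm)) (hP.1 q hq')

-- ---- the run-grouping recursion computes the per-key sections ----
theorem pv_emit_spec (ps : List (String × String))
    (h : ps.Pairwise (fun a b => a.1 ≤ b.1)) :
    pvEmit ps = (PySem.Set.ofList (ps.map Prod.fst)).flatMap (pvSec ps) := by
  induction ps using pvEmit.induct with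
  | case1 => simp [pvEmit]
  | case2 p rest ih =>
    rw [List.pairwise_cons] at h
    have hall : ∀ q ∈ rest, p.1 ≤ q.1 := h.1
    have hrun : ∀ q ∈ rest.takeWhile (fun q => q.1 == p.1), q.1 = p.1 := by
      intro q hq; exact beq_iff_eq.mp (List.mem_takeWhile_imp (p := fun q : String × String => q.1 == p.1) hq)
    have hgt : ∀ q ∈ rest.dropWhile (fun q => q.1 == p.1), p.1 < q.1 :=
      pv_drop_gt p.1 rest h.2 hall
    have hsplit : rest.takeWhile (fun q => q.1 == p.1) ++ rest.dropWhile (fun q => q.1 == p.1)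
        = rest := List.takeWhile_append_dropWhile
    -- the filter at the head key is the head plus its run
    have hfilter : (p :: rest).filter (fun q => q.1 == p.1)
        = p :: rest.takeWhile (fun q => q.1 == p.1) := by
      rw [List.filter_cons_of_pos (by simp)]
      congr 1
      conv_lhs => rw [← hsplit]
      rw [List.filter_append]
      rw [List.filter_eq_self.mpr (fun a ha => by simp [hrun a ha]),
          List.filter_eq_nil_iff.mpr (fun a ha => by simp [ne_of_gt (hgt a ha)]),
          List.append_nil]
    -- distinct keys = head key, then the distinct keys of the tail after the run
    have hkeys : PySem.Set.ofList ((p :: rest).map Prod.fst)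
        = p.1 :: PySem.Set.ofList ((rest.dropWhile (fun q => q.1 == p.1)).map Prod.fst) := by
      conv_lhs => rw [← hsplit]
      rw [PySem.Set.ofList_eq_foldl, PySem.Set.ofList_eq_foldl, List.map_cons,
          List.map_append, List.foldl_cons, List.foldl_append]
      have h1 : PySem.Set.add ([] : PySem.Set String) p.1 = [p.1] := rfl
      rw [h1, pv_foldl_add_of_mem ((rest.takeWhile (fun q => q.1 == p.1)).map Prod.fst) [p.1]
        (fun x hx => by
          rcases List.mem_map.mp hx with ⟨q, hq, rfl⟩
          simp [hrun q hq])]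
      exact pv_foldl_add_cons _ _ _ (fun hm => by
        rcases List.mem_map.mp hm with ⟨q, hq, he⟩
        exact absurd he (ne_of_gt (hgt q hq)))
    -- sections of later keys ignore the head and its run
    have hlater : ∀ k ∈ PySem.Set.ofList ((rest.dropWhile (fun q => q.1 == p.1)).map Prod.fst),
        pvSec (p :: rest) k = pvSec (rest.dropWhile (fun q => q.1 == p.1)) k := by
      intro k hk
      rcases List.mem_map.mp ((PySem.Set.mem_ofList _ _).mp hk) with ⟨q, hq, rfl⟩
      have hkgt : p.1 < q.1 := hgt q hq
      have : (p :: rest).filter (fun r => r.1 == q.1)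
          = (rest.dropWhile (fun r => r.1 == p.1)).filter (fun r => r.1 == q.1) := by
        rw [List.filter_cons_of_neg (by simp [ne_of_lt hkgt])]
        conv_lhs => rw [← hsplit]
        rw [List.filter_append,
            List.filter_eq_nil_iff.mpr (fun a ha => by
              simp [hrun a ha, ne_of_lt hkgt]), List.nil_append]
      simp only [pvSec, pvGrp, this]
    have hdp : (rest.dropWhile (fun q => q.1 == p.1)).Pairwise (fun a b => a.1 ≤ b.1) :=
      List.Pairwise.sublist (List.dropWhile_sublist _) h.2
    rw [pvEmit, hkeys, List.flatMap_cons, List.flatMap_congr hlater, ← ih hdp]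
    have hsec : pvSec (p :: rest) p.1
        = (PySem.Str.join "" ["**", p.1, "** (",
            PySem.Int.toStr (((p.2 :: (rest.takeWhile (fun q => q.1 == p.1)).map Prod.snd).length : Int)), " tools)"]
          :: p.2 :: (rest.takeWhile (fun q => q.1 == p.1)).map Prod.snd) ++ [""] := by
      simp [pvSec, pvGrp, hfilter]
    rw [hsec]

-- ---- the sorted distinct keys are the distinct keys of the sorted pairs ----
theorem pv_foldl_add_sublist (l : List String) (acc : PySem.Set String) :
    (l.foldl PySem.Set.add acc).Sublist (acc ++ l) := by
  induction l generalizing acc with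
  | nil => simp
  | cons x l ih =>
    rw [List.foldl_cons]
    refine (ih (PySem.Set.add acc x)).trans ?_
    have : (PySem.Set.add acc x).Sublist (acc ++ [x]) := by
      simp only [PySem.Set.add]
      by_cases hm : x ∈ acc <;> simp [hm]
    simpa using this.append (List.Sublist.refl l)

theorem pv_ofList_sublist (l : List String) : (PySem.Set.ofList l).Sublist l := by
  simpa using pv_foldl_add_sublist l []

theorem pv_keys_sorted (pairs : List (String × String)) :
    PySem.List.sorted (PySem.Set.ofList (pairs.map Prod.fst)) (fun k => k) false
    = PySem.Set.ofList ((PySem.List.sorted pairs (fun q => q.1) false).map Prod.fst) := by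
  apply PySem.List.sorted_eq_of_perm_of_pairwise_lt
  · rw [List.perm_ext_iff_of_nodup (PySem.Set.nodup_ofList _) (PySem.Set.nodup_ofList _)]
    intro a
    rw [PySem.Set.mem_ofList, PySem.Set.mem_ofList]
    exact ((PySem.List.sorted_perm pairs (fun q => q.1) false).map Prod.fst).mem_iff
  · have hle : (((PySem.List.sorted pairs (fun q => q.1) false).map Prod.fst)).Pairwise
        (fun a b => a ≤ b) := PySem.List.sorted_map_key_pairwise pairs (fun q => q.1)
    have hsub := pv_ofList_sublist ((PySem.List.sorted pairs (fun q => q.1) false).map Prod.fst)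
    have hnd : (PySem.Set.ofList ((PySem.List.sorted pairs (fun q => q.1) false).map Prod.fst)).Nodup :=
      PySem.Set.nodup_ofList _
    exact ((List.Pairwise.sublist hsub hle).and hnd).imp (fun h => lt_of_le_of_ne h.1 h.2)

-- ---- main ----
theorem pv_main (tools : List (List (String × String))) :
    build_capability_inventory tools = build_capability_inventory_alt tools := by
  unfold build_capability_inventory build_capability_inventory_alt
  show PySem.Str.join "\n" _ = PySem.Str.join "\n" _
  congr 1
  -- A's dict-building loop, via the per-tool pair
  have hfold : tools.foldl (fun (g : PySem.Dict String (List String)) tool =>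
        let name := pvGetStr tool "name"
        let desc := pvGetStr tool "description"
        let desc := if desc != "" && PySem.Str.isIn ". " desc then
            PySem.Str.slice desc none (some (PySem.Str.find desc ". " + 1)) else desc
        let desc := if PySem.Str.len desc > 120 then
            PySem.Str.join "" [PySem.Str.slice desc none (some 117), "..."] else desc
        let prefix_ := if PySem.Str.isIn "_" name then
            PySem.Str.slice name none (some (PySem.Str.find name "_")) else "general"
        let entry := if desc != "" then PySem.Str.join "" ["  - ", name, ": ", desc]
                     else PySem.Str.join "" ["  - ", name]
        g.modify prefix_ [] (fun l => l ++ [entry])) PySem.Dict.empty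
      = (tools.map pvFormat).foldl (fun d p => d.modify p.1 [] (fun l => l ++ [p.2]))
          PySem.Dict.empty := by
    rw [List.foldl_map]
    refine PySem.List.foldl_congr_mem _ _ _ _ ?_
    intro acc x _
    show acc.modify (pvPairA x).1 [] (fun l => l ++ [(pvPairA x).2]) = _
    rw [pvPairA_eq]
  rw [hfold]
  set pairs := tools.map pvFormat with hpairs
  have hkeys : ((pairs.foldl (fun d p => d.modify p.1 [] (fun l => l ++ [p.2])) PySem.Dict.empty).keys)
      = PySem.Set.ofList (pairs.map (fun p => p.1)) := by
    have := PySem.Dict.keys_foldl_modify_key pairs (fun p => p.1)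
      ([] : List String) (fun _ p => (fun l => l ++ [p.2])) PySem.Dict.empty
    simpa [PySem.Set.update_nil_left] using this
  have hgetD : ∀ c, (pairs.foldl (fun d p => d.modify p.1 [] (fun l => l ++ [p.2])) PySem.Dict.empty).getD c []
      = pvGrp pairs c := by
    intro c
    simpa [pvGrp] using PySem.Dict.getD_foldl_modify_append pairs PySem.Dict.empty c
  rw [hkeys]
  simp only [List.append_assoc]
  rw [PySem.List.foldl_append_eq_flatMap, List.nil_append]
  rw [pv_emit_spec _ (PySem.List.sorted_pairwise pairs (fun p => p.1)),
      ← pv_keys_sorted pairs]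
  refine List.flatMap_congr ?_
  intro k _
  rw [hgetD k]
  simp [pvSec, pvGrp, pv_filter_sorted]

-- ===== VERDICT (by name: the statement is the Claim_ definition above) =====
theorem build_capability_inventory_spec : Claim_equal_build_capability_inventory := by
  intro tools _
  exact pv_main tools
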